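-- pv_equiv track=rewrite | github.com/EvanJeon-hub/ICS33 | problem2.py | generate_range
-- ===== SOURCE A (Python) =====
-- def generate_range(start, end = None, step = 1):
--     if end is None:
--         end = start
--         start = 0
--
--     if step == 0:
--         raise ValueError("Step cannot be zero.")
--
--     if step > 0:
--         while start < end:
--             yield start
--             start += step
--     else:
--         while start > end:
--             yield start
--             start += step
-- ===== SOURCE B (Python) =====
-- def generate_range(start, end = None, step = 1):
--     if end is None:
--         end = start
--         start = 0
--
--     if step == 0:
--         raise ValueError("Step cannot be zero.")
--
--     # closed-form element count: n = ceil((end - start) / step)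
--     n = -((start - end) // step)
--     for i in range(n):
--         yield start + i * step
-- ===== Notes on version B (the rewrite author's own statement) =====
-- stated objective: alternative
-- what changed: B computes the element count n = ceil((end-start)/step) in closed form with one floor division and yields start + i*step over range(n), instead of A's accumulating while-loops with a comparison per step.
import Mathlib
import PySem

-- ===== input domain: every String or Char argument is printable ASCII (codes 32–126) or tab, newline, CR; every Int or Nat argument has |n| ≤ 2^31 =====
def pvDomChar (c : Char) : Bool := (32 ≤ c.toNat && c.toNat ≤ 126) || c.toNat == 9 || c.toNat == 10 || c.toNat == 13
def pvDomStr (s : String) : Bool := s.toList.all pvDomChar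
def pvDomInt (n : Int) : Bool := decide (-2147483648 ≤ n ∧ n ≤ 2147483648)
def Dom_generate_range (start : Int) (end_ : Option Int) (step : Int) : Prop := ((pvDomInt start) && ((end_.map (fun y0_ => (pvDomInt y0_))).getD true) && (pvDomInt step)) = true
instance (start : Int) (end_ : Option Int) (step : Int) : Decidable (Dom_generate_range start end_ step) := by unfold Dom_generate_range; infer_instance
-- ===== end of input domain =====

-- B replaces A's accumulating while-loops by a closed-form element count and indexed generation (alternative decomposition, same cost).

-- ===== PORT A =====
-- A's `while start < end: yield start; start += step` (step > 0 branch)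
def upLoop (end_ step start : Int) : List Int :=
  if _h : start < end_ ∧ 0 < step then start :: upLoop end_ step (start + step) else []
termination_by (end_ - start).toNat
decreasing_by omega

-- A's `while start > end: yield start; start += step` (else branch)
def downLoop (end_ step start : Int) : List Int :=
  if _h : end_ < start ∧ step < 0 then start :: downLoop end_ step (start + step) else []
termination_by (start - end_).toNat
decreasing_by omega

def generate_range (start : Int) (end_ : Option Int) (step : Int) : List Int :=
  let p := match end_ with
    | none => (0, start)        -- end = start; start = 0
    | some e => (start, e)
  if step = 0 then []           -- raise ValueError("Step cannot be zero."): excluded by Pre_generate_range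
  else if 0 < step then upLoop p.2 step p.1
  else downLoop p.2 step p.1

-- ===== PORT B =====
def generate_range_alt (start : Int) (end_ : Option Int) (step : Int) : List Int :=
  let p := match end_ with
    | none => (0, start)        -- end = start; start = 0
    | some e => (start, e)
  if step = 0 then []           -- raise ValueError("Step cannot be zero."): excluded by Pre_generate_range
  else
    let n := -(PySem.Int.floordiv (p.1 - p.2) step)        -- n = -((start - end) // step)
    (List.range n.toNat).map (fun (i : Nat) => p.1 + (i : Int) * step)   -- for i in range(n): yield start + i*step

-- ===== PRECONDITION & SPEC =====
-- Pre_ excludes exactly step = 0, on which Python A (and B) raise ValueError.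
def Pre_generate_range (start : Int) (end_ : Option Int) (step : Int) : Prop := step ≠ 0
instance (start : Int) (end_ : Option Int) (step : Int) : Decidable (Pre_generate_range start end_ step) := by unfold Pre_generate_range; infer_instance
def pvWitness_generate_range : Int × Option Int × Int := (1, some 7, 2)

def Spec_generate_range (start : Int) (end_ : Option Int) (step : Int) (out : List Int) : Prop := out = generate_range_alt start end_ step
instance (start : Int) (end_ : Option Int) (step : Int) (out : List Int) : Decidable (Spec_generate_range start end_ step out) := by unfold Spec_generate_range; infer_instance

-- ===== CLAIM (what is proved, stated in full; the proofs are below) =====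
def Claim_equal_generate_range : Prop := ∀ (start : Int) (end_ : Option Int) (step : Int), Dom_generate_range start end_ step → Pre_generate_range start end_ step → Spec_generate_range start end_ step (generate_range start end_ step)

-- ===== LEMMAS AND PROOFS =====

lemma upLoop_eq (e step : Int) (hstep : 0 < step) :
    ∀ (k : Nat) (s : Int), (e - s).toNat ≤ k →
      upLoop e step s = (List.range (-(PySem.Int.floordiv (s - e) step)).toNat).map
        (fun (i : Nat) => s + (i : Int) * step) := by
  intro k
  induction k with
  | zero =>
    intro s hs
    have h0 : (0:Int) ≤ PySem.Int.floordiv (s - e) step :=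
      (PySem.Int.le_floordiv_iff_mul_le hstep).mpr (by omega)
    rw [upLoop, dif_neg (by omega)]
    have : (-(PySem.Int.floordiv (s - e) step)).toNat = 0 := by omega
    simp [this]
  | succ k ih =>
    intro s hs
    by_cases hse : s < e
    · set q := PySem.Int.floordiv (s - e) step with hqdef
      have hq : q * step ≤ s - e ∧ s - e < (q + 1) * step :=
        (PySem.Int.floordiv_eq_iff_of_pos hstep).mp hqdef.symm
      have hqneg : q < 0 := (PySem.Int.floordiv_lt_iff_lt_mul hstep).mpr (by omega)
      have hshift : PySem.Int.floordiv (s + step - e) step = q + 1 := by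
        rw [PySem.Int.floordiv_eq_iff_of_pos hstep]
        constructor <;> nlinarith [hq.1, hq.2]
      have hrec := ih (s + step) (by omega)
      rw [upLoop, dif_pos ⟨hse, hstep⟩, hrec, hshift]
      have hn : (-q).toNat = (-(q + 1)).toNat + 1 := by omega
      rw [hn, List.range_succ_eq_map]
      simp only [List.map_cons, List.map_map]
      congr 1
      · push_cast; ring
      · apply List.map_congr_left
        intro i _
        simp only [Function.comp_apply]
        push_cast
        ring
    · have h0 : (0:Int) ≤ PySem.Int.floordiv (s - e) step :=
        (PySem.Int.le_floordiv_iff_mul_le hstep).mpr (by omega)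
      rw [upLoop, dif_neg (by omega)]
      have : (-(PySem.Int.floordiv (s - e) step)).toNat = 0 := by omega
      simp [this]

lemma downLoop_eq (e step : Int) (hstep : step < 0) :
    ∀ (k : Nat) (s : Int), (s - e).toNat ≤ k →
      downLoop e step s = (List.range (-(PySem.Int.floordiv (s - e) step)).toNat).map
        (fun (i : Nat) => s + (i : Int) * step) := by
  have hpos : 0 < -step := by omega
  have hflip : ∀ s : Int, PySem.Int.floordiv (s - e) step = PySem.Int.floordiv (e - s) (-step) := by
    intro s
    have := PySem.Int.floordiv_neg_neg (e - s) (-step)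
    simpa using this
  intro k
  induction k with
  | zero =>
    intro s hs
    have h0 : (0:Int) ≤ PySem.Int.floordiv (e - s) (-step) :=
      (PySem.Int.le_floordiv_iff_mul_le hpos).mpr (by omega)
    rw [downLoop, dif_neg (by omega), hflip]
    have : (-(PySem.Int.floordiv (e - s) (-step))).toNat = 0 := by omega
    simp [this]
  | succ k ih =>
    intro s hs
    by_cases hse : e < s
    · rw [hflip]
      set q := PySem.Int.floordiv (e - s) (-step) with hqdef
      have hq : q * (-step) ≤ e - s ∧ e - s < (q + 1) * (-step) :=
        (PySem.Int.floordiv_eq_iff_of_pos hpos).mp hqdef.symm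
      have hqneg : q < 0 := (PySem.Int.floordiv_lt_iff_lt_mul hpos).mpr (by omega)
      have hshift : PySem.Int.floordiv (e - (s + step)) (-step) = q + 1 := by
        rw [PySem.Int.floordiv_eq_iff_of_pos hpos]
        constructor <;> nlinarith [hq.1, hq.2]
      have hrec := ih (s + step) (by omega)
      rw [downLoop, dif_pos ⟨hse, hstep⟩, hrec, hflip, hshift]
      have hn : (-q).toNat = (-(q + 1)).toNat + 1 := by omega
      rw [hn, List.range_succ_eq_map]
      simp only [List.map_cons, List.map_map]
      congr 1
      · push_cast; ring
      · apply List.map_congr_left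
        intro i _
        simp only [Function.comp_apply]
        push_cast
        ring
    · have h0 : (0:Int) ≤ PySem.Int.floordiv (e - s) (-step) :=
        (PySem.Int.le_floordiv_iff_mul_le hpos).mpr (by omega)
      rw [downLoop, dif_neg (by omega), hflip]
      have : (-(PySem.Int.floordiv (e - s) (-step))).toNat = 0 := by omega
      simp [this]

-- ===== VERDICT (by name: the statement is the Claim_ definition above) =====
theorem generate_range_spec : Claim_equal_generate_range := by
  intro start end_ step _ hpre
  unfold Spec_generate_range generate_range generate_range_alt
  rcases lt_trichotomy step 0 with h | h | h
  · simp only [if_neg hpre, if_neg (by omega : ¬ 0 < step)]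
    exact downLoop_eq _ _ h _ _ le_rfl
  · exact absurd h hpre
  · simp only [if_neg hpre, if_pos h]
    exact upLoop_eq _ _ h _ _ le_rfl
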